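-- pv_equiv track=rewrite | github.com/weihe13/Lee_code | Amazon/amazon.py | getEncryptedNumber
-- ===== SOURCE A (Python) =====
-- def getEncryptedNumber(array):
--     level = array
--     while len(level) > 2:
--         temp = []
--         for i in range(len(level) - 1):
--             temp.append(int(str(level[i] + level[i + 1])[-1]))
--         level = temp
--     return level
-- ===== SOURCE B (Python) =====
-- def getEncryptedNumber(array):
--     n = len(array)
--     if n <= 2:
--         return list(array)
--     # one pass to digits, then a binomial-weighted sum mod 10 (Lucas + CRT) instead of O(n^2) repeated reduction
--     d = [abs(array[i] + array[i + 1]) % 10 for i in range(n - 1)]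
--     k = len(d) - 2  # number of remaining reduction steps
--
--     def lucas(p, n_, k_):
--         # C(n_, k_) mod prime p via Lucas' theorem
--         if k_ == 0:
--             return 1
--         a = n_ % p
--         b = k_ % p
--         if a < b:
--             return 0
--         num = 1
--         den = 1
--         for t in range(b):
--             num *= a - t
--             den *= t + 1
--         return ((num // den) % p) * lucas(p, n_ // p, k_ // p) % p
--
--     res = []
--     for j in (0, 1):
--         s = 0
--         for i in range(k + 1):
--             c = (5 * lucas(2, k, i) + 6 * lucas(5, k, i)) % 10
--             s += c * d[j + i]
--         res.append(s % 10)
--     return res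
-- ===== Notes on version B (the rewrite author's own statement) =====
-- stated objective: faster
-- what changed: Replaces the O(n^2) repeated adjacent last-digit reduction with a single digit pass followed by a closed-form binomial-weighted sum mod 10, with binomial coefficients mod 10 computed by Lucas' theorem mod 2 and mod 5 combined by CRT.
import Mathlib
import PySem

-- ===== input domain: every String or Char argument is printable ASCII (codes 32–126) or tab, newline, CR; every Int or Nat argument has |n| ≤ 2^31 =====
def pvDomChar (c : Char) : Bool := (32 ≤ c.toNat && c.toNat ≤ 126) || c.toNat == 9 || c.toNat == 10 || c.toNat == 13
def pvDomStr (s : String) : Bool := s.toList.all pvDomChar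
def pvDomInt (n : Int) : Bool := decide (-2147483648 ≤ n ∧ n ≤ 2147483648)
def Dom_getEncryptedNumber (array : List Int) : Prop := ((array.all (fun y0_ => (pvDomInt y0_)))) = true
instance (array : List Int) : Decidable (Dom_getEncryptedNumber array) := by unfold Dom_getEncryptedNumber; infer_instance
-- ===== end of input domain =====

-- B replaces A's repeated adjacent last-digit reduction by one digit pass plus a binomial-weighted
-- sum mod 10 (Lucas' theorem mod 2 and mod 5, combined by CRT); measured faster on large inputs.

-- ===== PORT A =====
-- int(str(x)[-1]); the .getD defaults are never reached (str(x) is nonempty and ends in a digit)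
def pvDigitA (x : Int) : Int :=
  (PySem.Int.ofStr? (String.ofList [((PySem.Str.pyGet? (PySem.Int.toStr x) (-1)).getD ' ')])).getD 0

-- one pass of the while-loop body: temp = []; for i in range(len(level)-1): temp.append(...)
def pvStepA (level : List Int) : List Int :=
  (PySem.List.pyRange 0 (PySem.List.len level - 1) 1).foldl
    (fun temp i =>
      temp ++ [pvDigitA (PySem.List.pyGetD level i 0 + PySem.List.pyGetD level (i + 1) 0)]) []

-- needed by the port's termination argument, hence stated here
theorem pvStepA_length (level : List Int) : (pvStepA level).length = level.length - 1 := by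
  rw [pvStepA, PySem.List.foldl_append_singleton_eq_map]
  simp [PySem.List.len, PySem.List.length_pyRange_one]

def getEncryptedNumber (array : List Int) : List Int :=
  if 2 < PySem.List.len array then getEncryptedNumber (pvStepA array) else array
termination_by array.length
decreasing_by
  rename_i h
  simp only [PySem.List.len] at h
  rw [pvStepA_length]; omega

-- ===== PORT B =====
-- C(n_, k_) mod prime p via Lucas' theorem (recursive helper of Source B); Python's nonnegative ints
-- are carried as Nat; the 'p ≤ 1' branch is a totality guard only, unreachable for p ∈ {2, 5}
def pvLucas (p n_ k_ : Nat) : Nat :=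
  if k_ = 0 then 1
  else if p ≤ 1 then 0
  else
    let a := n_ % p
    let b := k_ % p
    if a < b then 0
    else
      let nd := (List.range b).foldl (fun (nd : Nat × Nat) t => (nd.1 * (a - t), nd.2 * (t + 1))) (1, 1)
      ((nd.1 / nd.2) % p) * pvLucas p (n_ / p) (k_ / p) % p
termination_by k_
decreasing_by exact Nat.div_lt_self (Nat.pos_of_ne_zero (by assumption)) (by omega)

def getEncryptedNumber_alt (array : List Int) : List Int :=
  let n := PySem.List.len array
  if n ≤ 2 then array
  else
    let d := (PySem.List.pyRange 0 (n - 1) 1).map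
      (fun i => PySem.Int.mod (|PySem.List.pyGetD array i 0 + PySem.List.pyGetD array (i + 1) 0|) 10)
    let k := d.length - 2
    [(0 : Int), 1].foldl (fun res j =>
      res ++ [PySem.Int.mod
        ((List.range (k + 1)).foldl (fun s i =>
          s + (((5 * pvLucas 2 k i + 6 * pvLucas 5 k i) % 10 : Nat) : Int) *
            PySem.List.pyGetD d (j + (i : Int)) 0) 0) 10]) []

-- ===== PRECONDITION & SPEC =====
def Spec_getEncryptedNumber (array : List Int) (out : List Int) : Prop := out = getEncryptedNumber_alt array
instance (array : List Int) (out : List Int) : Decidable (Spec_getEncryptedNumber array out) := by unfold Spec_getEncryptedNumber; infer_instance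

-- ===== CLAIM (what is proved, stated in full; the proofs are below) =====
def Claim_equal_getEncryptedNumber : Prop := ∀ (array : List Int), Dom_getEncryptedNumber array → Spec_getEncryptedNumber array (getEncryptedNumber array)

-- ===== LEMMAS AND PROOFS =====

-- the mathematical last-digit map: |x| mod 10
def pvG (x : Int) : Int := ((x.natAbs % 10 : Nat) : Int)

-- the mathematical one-step reduction
def pvStepM (l : List Int) : List Int :=
  (List.range (l.length - 1)).map (fun i => pvG (l.getD i 0 + l.getD (i + 1) 0))

-- the binomial-weighted sum the whole reduction collapses to
def pvS (l : List Int) (j : Nat) : Int :=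
  ∑ i ∈ Finset.range (l.length - 1), ((l.length - 2).choose i : Int) * l.getD (j + i) 0

-- ---- A's digit extraction is |x| mod 10 ----

theorem pvToDigitsCore_append (b : Nat) : ∀ (f n : Nat) (ds : List Char),
    Nat.toDigitsCore b f n ds = Nat.toDigitsCore b f n [] ++ ds := by
  intro f
  induction f with
  | zero => intro n ds; simp [Nat.toDigitsCore]
  | succ f ih =>
      intro n ds
      rw [Nat.toDigitsCore, Nat.toDigitsCore]
      by_cases h : n / b = 0
      · simp [h]
      · simp only [if_neg h]
        rw [ih (n / b) ((n % b).digitChar :: ds), ih (n / b) [(n % b).digitChar]]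
        simp

theorem pvToDigits_concat (n : Nat) :
    ∃ pre, Nat.toDigits 10 n = pre ++ [Nat.digitChar (n % 10)] := by
  rw [Nat.toDigits, Nat.toDigitsCore]
  by_cases h : n / 10 = 0
  · exact ⟨[], by simp [h]⟩
  · refine ⟨Nat.toDigitsCore 10 n (n / 10) [], ?_⟩
    simp only [if_neg h]
    exact pvToDigitsCore_append 10 n (n / 10) [(n % 10).digitChar]

theorem pvToChars_concat (x : Int) :
    ∃ pre, PySem.Int.toChars x = pre ++ [Nat.digitChar (x.natAbs % 10)] := by
  rw [PySem.Int.toChars]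
  by_cases h : x < 0
  · obtain ⟨pre, hp⟩ := pvToDigits_concat x.natAbs
    exact ⟨'-' :: pre, by simp [h, hp]⟩
  · obtain ⟨pre, hp⟩ := pvToDigits_concat x.toNat
    refine ⟨pre, ?_⟩
    rw [if_neg h, hp, show x.toNat = x.natAbs by omega]

theorem pvDigitA_eq (x : Int) : pvDigitA x = pvG x := by
  obtain ⟨pre, hp⟩ := pvToChars_concat x
  have hget : PySem.Str.pyGet? (PySem.Int.toStr x) (-1) = some (Nat.digitChar (x.natAbs % 10)) := by
    rw [PySem.Str.pyGet?, PySem.Int.toList_toStr, hp]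
    rw [PySem.Chars.pyGet?, PySem.List.pyGet?, PySem.List.pyIdx?]
    have hl : (pre ++ [Nat.digitChar (x.natAbs % 10)]).length = pre.length + 1 := by simp
    rw [hl]
    norm_num
  rw [pvDigitA, hget]
  simp only [Option.getD_some]
  have hr : x.natAbs % 10 < 10 := Nat.mod_lt _ (by norm_num)
  set r := x.natAbs % 10 with hrdef
  unfold pvG
  rw [← hrdef]
  interval_cases r <;> decide

-- ---- one loop pass of A is the mathematical step ----

theorem pvStepA_eq (l : List Int) : pvStepA l = pvStepM l := by
  rw [pvStepA, PySem.List.foldl_append_singleton_eq_map, PySem.List.len, PySem.List.pyRange_one]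
  rw [List.map_map]
  rw [show ((l.length : Int) - 1 - 0).toNat = l.length - 1 by omega]
  unfold pvStepM
  apply List.map_congr_left
  intro k hk
  simp only [Function.comp_apply, zero_add]
  rw [pvDigitA_eq]
  rw [PySem.List.pyGetD_natCast]
  rw [show ((k : Int) + 1) = ((k + 1 : Nat) : Int) by push_cast; ring]
  rw [PySem.List.pyGetD_natCast]

theorem pvStepM_bounds (l : List Int) : ∀ x ∈ pvStepM l, 0 ≤ x ∧ x < 10 := by
  intro x hx
  simp [pvStepM] at hx
  obtain ⟨i, _, rfl⟩ := hx
  unfold pvG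
  constructor
  · positivity
  · exact_mod_cast Nat.mod_lt _ (by norm_num)

-- ---- Lucas' theorem for B's helper ----

theorem pvFold_desc (a : Nat) : ∀ b : Nat,
    (List.range b).foldl (fun (nd : Nat × Nat) t => (nd.1 * (a - t), nd.2 * (t + 1))) (1, 1)
      = (a.descFactorial b, b.factorial) := by
  intro b
  induction b with
  | zero => simp
  | succ b ih =>
      rw [List.range_succ, List.foldl_append, ih]
      simp [Nat.descFactorial_succ, Nat.factorial_succ]
      constructor <;> ring

theorem pvLucas_eq (p : Nat) (hp : p.Prime) (n k : Nat) : pvLucas p n k = n.choose k % p := by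
  induction k using Nat.strong_induction_on generalizing n with
  | _ k IH =>
    haveI : Fact p.Prime := ⟨hp⟩
    have hlucas := @Choose.choose_modEq_choose_mod_mul_choose_div_nat n k p _
    rw [pvLucas]
    by_cases hk : k = 0
    · subst hk; simp [Nat.one_mod_eq_one.mpr hp.one_lt.ne']
    · rw [if_neg hk, if_neg (by have := hp.two_le; omega : ¬ p ≤ 1)]
      simp only []
      by_cases hab : n % p < k % p
      · rw [if_pos hab]
        have h0 : (n % p).choose (k % p) = 0 := Nat.choose_eq_zero_of_lt hab
        rw [Nat.ModEq] at hlucas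
        rw [hlucas, h0, zero_mul, Nat.zero_mod]
      · rw [if_neg hab, pvFold_desc]
        rw [← Nat.choose_eq_descFactorial_div_factorial]
        rw [IH (k / p) (Nat.div_lt_self (Nat.pos_of_ne_zero hk) hp.one_lt) (n / p)]
        rw [← Nat.mul_mod]
        exact (Nat.ModEq.symm hlucas)

-- ---- one Pascal step on the weighted sum ----

theorem pvPascalSum (k : Nat) (u : Nat → Int) :
    ∑ i ∈ Finset.range (k + 1), ((k.choose i : Int)) * (u i + u (i + 1)) =
      ∑ i ∈ Finset.range (k + 2), ((k + 1).choose i : Int) * u i := by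
  have hR : ∑ i ∈ Finset.range (k + 2), ((k + 1).choose i : Int) * u i
      = (∑ i ∈ Finset.range (k + 1), ((k + 1).choose (i + 1) : Int) * u (i + 1)) + u 0 := by
    rw [Finset.sum_range_succ']
    simp
  have hsplit : ∀ i, ((k + 1).choose (i + 1) : Int) = (k.choose i : Int) + (k.choose (i + 1) : Int) := by
    intro i
    have := Nat.choose_succ_succ k i
    push_cast [this]
    ring
  rw [hR]
  have h2 : (∑ i ∈ Finset.range (k + 1), ((k + 1).choose (i + 1) : Int) * u (i + 1))
      = (∑ i ∈ Finset.range (k + 1), (k.choose i : Int) * u (i + 1))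
        + (∑ i ∈ Finset.range (k + 1), (k.choose (i + 1) : Int) * u (i + 1)) := by
    rw [← Finset.sum_add_distrib]
    exact Finset.sum_congr rfl (fun i _ => by rw [hsplit]; ring)
  rw [h2]
  have h3 : (∑ i ∈ Finset.range (k + 1), (k.choose (i + 1) : Int) * u (i + 1)) + u 0
      = ∑ i ∈ Finset.range (k + 1), (k.choose i : Int) * u i := by
    rw [Finset.sum_range_succ, Nat.choose_succ_self]
    rw [Finset.sum_range_succ' (fun i => (k.choose i : Int) * u i)]
    simp
  have hL : ∑ i ∈ Finset.range (k + 1), ((k.choose i : Int)) * (u i + u (i + 1))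
      = (∑ i ∈ Finset.range (k + 1), (k.choose i : Int) * u i)
        + (∑ i ∈ Finset.range (k + 1), (k.choose i : Int) * u (i + 1)) := by
    rw [← Finset.sum_add_distrib]
    exact Finset.sum_congr rfl (fun i _ => by ring)
  rw [hL, ← h3]
  ring

-- ---- the weighted sum is invariant (mod 10) under one reduction step ----

theorem pvGetD_nonneg {l : List Int} (hb : ∀ x ∈ l, 0 ≤ x) (t : Nat) : 0 ≤ l.getD t 0 := by
  rw [List.getD_eq_getElem?_getD]
  cases h : l[t]? with
  | none => simp
  | some v => simpa using hb v (List.mem_of_getElem? h)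

theorem pvG_mod (C s : Int) (hs : 0 ≤ s) : (C * pvG s) % 10 = (C * s) % 10 := by
  have h1 : pvG s = s % 10 := by
    unfold pvG
    rw [Int.natCast_mod, Int.natAbs_of_nonneg hs]
    norm_num
  rw [h1, Int.mul_emod, Int.emod_emod_of_dvd _ dvd_rfl, ← Int.mul_emod]

theorem pvStepM_getD (l : List Int) (t : Nat) (ht : t < l.length - 1) :
    (pvStepM l).getD t 0 = pvG (l.getD t 0 + l.getD (t + 1) 0) := by
  unfold pvStepM
  rw [List.getD_eq_getElem?_getD, List.getElem?_map, List.getElem?_range ht]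
  simp

theorem pvS_step (l : List Int) (hb : ∀ x ∈ l, 0 ≤ x) (hlen : 3 ≤ l.length)
    (j : Nat) (hj : j ≤ 1) : pvS (pvStepM l) j % 10 = pvS l j % 10 := by
  have hsl : (pvStepM l).length = l.length - 1 := by simp [pvStepM]
  obtain ⟨k, hk⟩ : ∃ k, l.length = k + 3 := ⟨l.length - 3, by omega⟩
  have hS1 : pvS (pvStepM l) j
      = ∑ i ∈ Finset.range (k + 1), ((k.choose i : Int)) *
          pvG (l.getD (j + i) 0 + l.getD (j + i + 1) 0) := by
    unfold pvS
    rw [hsl, hk]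
    simp only [show k + 3 - 1 - 1 = k + 1 by omega, show k + 3 - 1 - 2 = k by omega]
    refine Finset.sum_congr rfl (fun i hi => ?_)
    rw [pvStepM_getD l (j + i) (by simp at hi; omega)]
  have hS2 : pvS (pvStepM l) j % 10
      = (∑ i ∈ Finset.range (k + 1), ((k.choose i : Int)) *
          (l.getD (j + i) 0 + l.getD (j + i + 1) 0)) % 10 := by
    rw [hS1, Finset.sum_int_mod]
    conv_rhs => rw [Finset.sum_int_mod]
    congr 1
    refine Finset.sum_congr rfl (fun i _ => ?_)
    exact pvG_mod _ _ (add_nonneg (pvGetD_nonneg hb _) (pvGetD_nonneg hb _))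
  rw [hS2]
  have hP := pvPascalSum k (fun i => l.getD (j + i) 0)
  simp only [show ∀ i, j + i + 1 = j + (i + 1) by omega] at hS2 ⊢
  rw [hP]
  unfold pvS
  rw [hk]
  simp only [show k + 3 - 1 = k + 2 by omega, show k + 3 - 2 = k + 1 by omega]

-- ---- A's whole loop collapses to the weighted sums ----

theorem pvReduce_eq_aux : ∀ (n : Nat) (l : List Int), l.length = n →
    (∀ x ∈ l, 0 ≤ x ∧ x < 10) → 2 ≤ n →
    getEncryptedNumber l = [pvS l 0 % 10, pvS l 1 % 10] := by
  intro n
  induction n using Nat.strong_induction_on with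
  | _ n IH =>
    intro l hln hb hlen
    by_cases h : 2 < l.length
    · rw [getEncryptedNumber, if_pos (by simp [PySem.List.len]; exact_mod_cast h), pvStepA_eq]
      have hsl : (pvStepM l).length = l.length - 1 := by simp [pvStepM]
      rw [IH (l.length - 1) (by omega) (pvStepM l) hsl (pvStepM_bounds l) (by omega)]
      rw [pvS_step l (fun x hx => (hb x hx).1) (by omega) 0 (by omega),
          pvS_step l (fun x hx => (hb x hx).1) (by omega) 1 (by omega)]
    · have h2 : l.length = 2 := by omega
      obtain ⟨x, y, rfl⟩ := List.length_eq_two.mp h2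
      rw [getEncryptedNumber, if_neg (by simp [PySem.List.len])]
      have hx := hb x (by simp)
      have hy := hb y (by simp)
      simp [pvS]
      constructor
      · rw [Int.emod_eq_of_lt hx.1 hx.2]
      · rw [Int.emod_eq_of_lt hy.1 hy.2]

theorem pvReduce_eq (l : List Int) (hb : ∀ x ∈ l, 0 ≤ x ∧ x < 10) (hlen : 2 ≤ l.length) :
    getEncryptedNumber l = [pvS l 0 % 10, pvS l 1 % 10] :=
  pvReduce_eq_aux l.length l rfl hb hlen

-- ---- B also computes the weighted sums ----

theorem pvFoldl_sum (f : Nat → Int) : ∀ (n : Nat),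
    (List.range n).foldl (fun s i => s + f i) 0 = ∑ i ∈ Finset.range n, f i := by
  intro n
  induction n with
  | zero => simp
  | succ n ih => rw [List.range_succ, List.foldl_append, ih, Finset.sum_range_succ]; simp

-- the coefficient Source B assembles by CRT is C(k,i) mod 10
theorem pvCoeff_eq (k i : Nat) :
    ((5 * pvLucas 2 k i + 6 * pvLucas 5 k i) % 10 : Nat) = k.choose i % 10 := by
  rw [pvLucas_eq 2 (by norm_num) k i, pvLucas_eq 5 (by norm_num) k i]
  omega

theorem pvD_eq (array : List Int) :
    (PySem.List.pyRange 0 (PySem.List.len array - 1) 1).map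
      (fun i => PySem.Int.mod (|PySem.List.pyGetD array i 0 + PySem.List.pyGetD array (i + 1) 0|) 10)
      = pvStepM array := by
  rw [PySem.List.len, PySem.List.pyRange_one, List.map_map,
    show ((array.length : Int) - 1 - 0).toNat = array.length - 1 by omega]
  unfold pvStepM
  apply List.map_congr_left
  intro t ht
  simp only [Function.comp_apply, zero_add]
  rw [PySem.List.pyGetD_natCast,
    show ((t : Int) + 1) = ((t + 1 : Nat) : Int) by push_cast; ring, PySem.List.pyGetD_natCast]
  rw [PySem.Int.mod_eq_emod_of_pos (by norm_num)]
  unfold pvG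
  rw [Int.abs_eq_natAbs, Int.natCast_mod]
  norm_num

theorem pvAlt_eq (array : List Int) (h : 2 < array.length) :
    getEncryptedNumber_alt array = [pvS (pvStepM array) 0 % 10, pvS (pvStepM array) 1 % 10] := by
  rw [getEncryptedNumber_alt]
  simp only []
  rw [if_neg (by simp [PySem.List.len]; exact_mod_cast h)]
  rw [pvD_eq]
  set d := pvStepM array with hd
  have hdl : d.length = array.length - 1 := by simp [hd, pvStepM]
  set k := d.length - 2 with hk
  have hterm : ∀ (j : Nat), j ≤ 1 →
      ((List.range (k + 1)).foldl (fun s i =>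
        s + (((5 * pvLucas 2 k i + 6 * pvLucas 5 k i) % 10 : Nat) : Int) *
          PySem.List.pyGetD d ((j : Int) + (i : Int)) 0) 0) % 10 = pvS d j % 10 := by
    intro j hj
    have hfold : ((List.range (k + 1)).foldl (fun s i =>
        s + (((5 * pvLucas 2 k i + 6 * pvLucas 5 k i) % 10 : Nat) : Int) *
          PySem.List.pyGetD d ((j : Int) + (i : Int)) 0) 0)
        = ∑ i ∈ Finset.range (k + 1), ((k.choose i % 10 : Nat) : Int) * d.getD (j + i) 0 := by
      rw [pvFoldl_sum (fun i => (((5 * pvLucas 2 k i + 6 * pvLucas 5 k i) % 10 : Nat) : Int) *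
          PySem.List.pyGetD d ((j : Int) + (i : Int)) 0) (k + 1)]
      refine Finset.sum_congr rfl (fun i _ => ?_)
      rw [pvCoeff_eq, show ((j : Int) + (i : Int)) = ((j + i : Nat) : Int) by push_cast; ring,
        PySem.List.pyGetD_natCast]
    rw [hfold]
    have hS : pvS d j = ∑ i ∈ Finset.range (k + 1), ((k.choose i : Nat) : Int) * d.getD (j + i) 0 := by
      unfold pvS
      rw [show d.length - 1 = k + 1 by omega]
    rw [hS, Finset.sum_int_mod]
    conv_rhs => rw [Finset.sum_int_mod]
    congr 1
    refine Finset.sum_congr rfl (fun i _ => ?_)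
    push_cast
    rw [Int.mul_emod, Int.emod_emod_of_dvd _ dvd_rfl, ← Int.mul_emod]
  have h0 := hterm 0 (by omega)
  have h1 := hterm 1 (by omega)
  simp only [List.foldl, List.nil_append]
  rw [PySem.Int.mod_eq_emod_of_pos (by norm_num), PySem.Int.mod_eq_emod_of_pos (by norm_num)]
  norm_num at h0 h1 ⊢
  exact ⟨h0, h1⟩

-- ===== VERDICT (by name: the statement is the Claim_ definition above) =====
theorem getEncryptedNumber_spec : Claim_equal_getEncryptedNumber := by
  intro array _
  unfold Spec_getEncryptedNumber
  by_cases h : 2 < array.length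
  · rw [getEncryptedNumber, if_pos (by simpa [PySem.List.len] using (by exact_mod_cast h : (2:Int) < array.length)), pvStepA_eq]
    rw [pvAlt_eq array h]
    exact pvReduce_eq _ (pvStepM_bounds array) (by simp [pvStepM]; omega)
  · rw [getEncryptedNumber, if_neg (by simp [PySem.List.len]; omega)]
    rw [getEncryptedNumber_alt]
    simp only [PySem.List.len]
    rw [if_pos (by exact_mod_cast by omega : (array.length : Int) ≤ 2)]
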